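-- pv_equiv track=rewrite | github.com/Helpsypoo/primerpython | blender_scripts/old_tex_bobject.py | add_non_overlapping_substrings
-- ===== SOURCE A (Python) =====
-- def add_non_overlapping_substrings(combo_in_progress, combos, substrings):
--     if len(combo_in_progress) > 0:
--         #Start checking substrings with the one after the last one added.
--         starting_index = substrings.index(combo_in_progress[-1]) + 1
--         #starting_index = 0
--     else:
--         starting_index = 0
--
--     for i in range(starting_index, len(substrings)):
--         #check if substring works
--         candidate = substrings[i]
--         no_overlap = True
--         #check if substring overlaps with any substring alredy
--         #in combo_in_progress. If so, don't add it to combos.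
--         for sub in combo_in_progress:
--             #E.g., sub = [0, 0, 1] and candidate = [3, 0, 1] overlap
--             no_overlap_in_1 = candidate[0] >= sub[0] + sub[2] or \
--                               candidate[0] + candidate[2] <= sub[0]
--             no_overlap_in_2 = candidate[1] >= sub[1] + sub[2] or \
--                               candidate[1] + candidate[2] <= sub[1]
--
--             no_overlap = (no_overlap_in_1 and no_overlap_in_2)
--
--             if no_overlap == False:
--                 break
--
--         if no_overlap == True:
--             new_combo = deepcopy(combo_in_progress)
--             new_combo.append(candidate)
--             combos.append(new_combo)
--             combos = add_non_overlapping_substrings(new_combo, combos, substrings)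
--
--     return combos
-- ===== SOURCE B (Python) =====
-- # Iterative pre-order DFS with an explicit stack instead of A's recursion.
-- # Like A, it appends the combos it finds to the `combos` list in place.
--
-- def _no_overlap(candidate, sub):
--     no_overlap_in_1 = candidate[0] >= sub[0] + sub[2] or \
--                       candidate[0] + candidate[2] <= sub[0]
--     no_overlap_in_2 = candidate[1] >= sub[1] + sub[2] or \
--                       candidate[1] + candidate[2] <= sub[1]
--     return no_overlap_in_1 and no_overlap_in_2
--
--
-- def _children(combo, substrings):
--     """Valid one-element extensions of `combo`, in candidate order."""
--     if combo:
--         start = substrings.index(combo[-1]) + 1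
--     else:
--         start = 0
--     kids = []
--     for i in range(start, len(substrings)):
--         candidate = substrings[i]
--         if all(_no_overlap(candidate, sub) for sub in combo):
--             kids.append(combo + [candidate])
--     return kids
--
--
-- def add_non_overlapping_substrings(combo_in_progress, combos, substrings):
--     # stack of pending combos, top at index 0 (pre-order DFS)
--     stack = _children(combo_in_progress, substrings)
--     while stack:
--         combo = stack[0]
--         combos.append(combo)
--         stack = _children(combo, substrings) + stack[1:]
--     return combos
-- ===== Notes on version B (the rewrite author's own statement) =====
-- stated objective: alternative
-- what changed: Replaces A's recursion (a recursive call per appended combo) by an iterative pre-order DFS over an explicit stack of pending combos, with the child-generation factored into a helper; same pre-order output sequence.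
-- outside the precondition, e.g. on add_non_overlapping_substrings([[-1, -1, 3]], [], [[0, 0, 0], [-1, -1, 3], [0, 0, 0]]): A returns [], B returns []; on add_non_overlapping_substrings([[0, 0, 5], [9]], [], [[9], [0, 0, 5]]): A returns [], B returns []
import Mathlib
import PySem

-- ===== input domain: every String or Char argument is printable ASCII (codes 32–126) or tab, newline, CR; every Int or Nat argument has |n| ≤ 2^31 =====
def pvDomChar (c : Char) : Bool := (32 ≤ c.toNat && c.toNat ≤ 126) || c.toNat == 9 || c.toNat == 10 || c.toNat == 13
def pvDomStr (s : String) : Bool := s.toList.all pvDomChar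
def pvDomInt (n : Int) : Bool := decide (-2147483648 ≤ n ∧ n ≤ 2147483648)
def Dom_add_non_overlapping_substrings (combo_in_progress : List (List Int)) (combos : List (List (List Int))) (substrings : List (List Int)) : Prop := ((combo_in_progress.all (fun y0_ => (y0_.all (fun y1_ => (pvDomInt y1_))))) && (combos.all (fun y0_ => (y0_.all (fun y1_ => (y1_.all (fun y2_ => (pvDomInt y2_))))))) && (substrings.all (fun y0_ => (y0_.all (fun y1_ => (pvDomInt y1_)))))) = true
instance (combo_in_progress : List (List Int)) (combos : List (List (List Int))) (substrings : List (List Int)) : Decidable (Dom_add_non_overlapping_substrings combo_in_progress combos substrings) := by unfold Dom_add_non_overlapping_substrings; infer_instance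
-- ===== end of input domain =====

-- B replaces A's recursion by an iterative pre-order DFS with an explicit stack of pending combos.
-- Both Pythons append the found combos to the `combos` argument in place; the equivalence proved
-- here is about the RETURN value only.


-- ===== PORT A =====
-- the inner `for sub in combo_in_progress: … if no_overlap == False: break` loop of A
-- (list indices 0/1/2 via List.getD: exact, since Pre_ keeps every compared entry at length ≥ 3)
def pvA_noOverlapLoop (candidate : List Int) : List (List Int) → Bool
  | [] => true
  | sub :: rest =>
    let no_overlap_in_1 := decide (candidate.getD 0 0 ≥ sub.getD 0 0 + sub.getD 2 0) ||
                           decide (candidate.getD 0 0 + candidate.getD 2 0 ≤ sub.getD 0 0)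
    let no_overlap_in_2 := decide (candidate.getD 1 0 ≥ sub.getD 1 0 + sub.getD 2 0) ||
                           decide (candidate.getD 1 0 + candidate.getD 2 0 ≤ sub.getD 1 0)
    if no_overlap_in_1 && no_overlap_in_2 then pvA_noOverlapLoop candidate rest else false

-- A's recursive body; the Nat fuel is only a totality guard (Python A can recurse forever on a
-- duplicated self-compatible substring, which Pre_ excludes; under Pre_ the recursion depth is
-- bounded by n*(n+1)+n+1 with n = substrings.length, see the measure pvMeas below)
def pvA_aux (substrings : List (List Int)) : Nat → List (List Int) → List (List (List Int)) → List (List (List Int))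
  | 0, _, combos => combos
  | fuel + 1, combo_in_progress, combos =>
    let starting_index : Int :=
      match combo_in_progress.getLast? with
      | some last => ((PySem.List.index? substrings last).getD 0 : Nat) + 1   -- substrings.index(...): ValueError excluded by Pre_
      | none => 0
    (PySem.List.pyRange starting_index (substrings.length : Int) 1).foldl
      (fun combos i =>
        let candidate := PySem.List.pyGetD substrings i []
        let no_overlap := pvA_noOverlapLoop candidate combo_in_progress
        if no_overlap then
          let new_combo := combo_in_progress ++ [candidate]
          pvA_aux substrings fuel new_combo (combos ++ [new_combo])
        else combos)
      combos

def add_non_overlapping_substrings (combo_in_progress : List (List Int)) (combos : List (List (List Int))) (substrings : List (List Int)) : List (List (List Int)) :=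
  pvA_aux substrings (substrings.length * (substrings.length + 1) + substrings.length + 1) combo_in_progress combos

-- ===== PORT B =====
def pvB_noOverlap (candidate sub : List Int) : Bool :=
  (decide (candidate.getD 0 0 ≥ sub.getD 0 0 + sub.getD 2 0) ||
   decide (candidate.getD 0 0 + candidate.getD 2 0 ≤ sub.getD 0 0)) &&
  (decide (candidate.getD 1 0 ≥ sub.getD 1 0 + sub.getD 2 0) ||
   decide (candidate.getD 1 0 + candidate.getD 2 0 ≤ sub.getD 1 0))

-- Source B's _children: the valid one-element extensions of `combo`, in candidate order
def pvB_children (substrings : List (List Int)) (combo : List (List Int)) : List (List (List Int)) :=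
  let start : Int :=
    match combo.getLast? with
    | some last => ((PySem.List.index? substrings last).getD 0 : Nat) + 1
    | none => 0
  (PySem.List.pyRange start (substrings.length : Int) 1).foldl
    (fun kids i =>
      let candidate := PySem.List.pyGetD substrings i []
      if combo.all (fun sub => pvB_noOverlap candidate sub) then kids ++ [combo ++ [candidate]]
      else kids)
    []

-- Source B's while loop over the explicit stack (top = head); the Nat fuel is only a totality
-- guard — under Pre_ the number of iterations is below this bound (lemma pvTree_length_lt)
def pvB_loop (substrings : List (List Int)) : Nat → List (List (List Int)) → List (List (List Int)) → List (List (List Int))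
  | 0, combos, _ => combos
  | _ + 1, combos, [] => combos
  | fuel + 1, combos, combo :: rest =>
    pvB_loop substrings fuel (combos ++ [combo]) (pvB_children substrings combo ++ rest)

def add_non_overlapping_substrings_alt (combo_in_progress : List (List Int)) (combos : List (List (List Int))) (substrings : List (List Int)) : List (List (List Int)) :=
  pvB_loop substrings ((substrings.length + 1) ^ (substrings.length * (substrings.length + 1) + substrings.length + 1)) combos (pvB_children substrings combo_in_progress)

-- ===== PRECONDITION & SPEC =====
-- `candidate`/`sub` do not overlap, written out independently of either port (A's overlap test)
def pvSelfCompat (c : List Int) : Bool :=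
  (decide (c.getD 0 0 ≥ c.getD 0 0 + c.getD 2 0) || decide (c.getD 0 0 + c.getD 2 0 ≤ c.getD 0 0)) &&
  (decide (c.getD 1 0 ≥ c.getD 1 0 + c.getD 2 0) || decide (c.getD 1 0 + c.getD 2 0 ≤ c.getD 1 0))

-- Pre_ excludes only inputs on which Python A does not return normally: (a) a nonempty combo whose
-- last entry is missing from substrings (ValueError); (b) a duplicated substring value that does not
-- overlap itself — A then re-picks that value forever and recurses without bound (e.g.
-- substrings = [[0,0,0],[0,0,0]]); the rare such inputs where the duplicate is blocked and A still
-- returns are excluded with them (cited); (c) entries of fewer than 3 components, which raise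
-- IndexError when compared — the rare short entries whose comparisons all short-circuit past the
-- missing component (so A still returns) are excluded with them (cited). Inputs where no comparison
-- can happen (at most one substring with an empty combo, or a combo whose last entry is indexed
-- last) are admitted outright, with no length or duplicate restriction.
def Pre_add_non_overlapping_substrings (combo_in_progress : List (List Int)) (combos : List (List (List Int))) (substrings : List (List Int)) : Prop :=
  (combo_in_progress = [] ∧
    (substrings.length ≤ 1 ∨
      ((∀ s ∈ substrings, 3 ≤ s.length) ∧
       (∀ c ∈ substrings, 2 ≤ substrings.count c → pvSelfCompat c = false)))) ∨
  (combo_in_progress ≠ [] ∧ ∃ l ∈ substrings, combo_in_progress.getLast? = some l ∧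
    (PySem.List.index? substrings l = some (substrings.length - 1) ∨
     ((∀ s ∈ substrings, 3 ≤ s.length) ∧ (∀ s ∈ combo_in_progress, 3 ≤ s.length) ∧
      (∀ c ∈ substrings, 2 ≤ substrings.count c → pvSelfCompat c = false))))
instance (combo_in_progress : List (List Int)) (combos : List (List (List Int))) (substrings : List (List Int)) : Decidable (Pre_add_non_overlapping_substrings combo_in_progress combos substrings) := by unfold Pre_add_non_overlapping_substrings; infer_instance

def pvWitness_add_non_overlapping_substrings : List (List Int) × List (List (List Int)) × List (List Int) :=
  ([], [], [[0, 0, 1], [2, 2, 1]])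

def Spec_add_non_overlapping_substrings (combo_in_progress : List (List Int)) (combos : List (List (List Int))) (substrings : List (List Int)) (out : List (List (List Int))) : Prop := out = add_non_overlapping_substrings_alt combo_in_progress combos substrings
instance (combo_in_progress : List (List Int)) (combos : List (List (List Int))) (substrings : List (List Int)) (out : List (List (List Int))) : Decidable (Spec_add_non_overlapping_substrings combo_in_progress combos substrings out) := by unfold Spec_add_non_overlapping_substrings; infer_instance

-- ===== CLAIM (what is proved, stated in full; the proofs are below) =====
def Claim_equal_add_non_overlapping_substrings : Prop := ∀ (combo_in_progress : List (List Int)) (combos : List (List (List Int))) (substrings : List (List Int)), Dom_add_non_overlapping_substrings combo_in_progress combos substrings → Pre_add_non_overlapping_substrings combo_in_progress combos substrings → Spec_add_non_overlapping_substrings combo_in_progress combos substrings (add_non_overlapping_substrings combo_in_progress combos substrings)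

-- ===== LEMMAS AND PROOFS =====

-- the starting index both versions compute for a combo
def pvStart (substrings : List (List Int)) (combo : List (List Int)) : Int :=
  match combo.getLast? with
  | some last => ((PySem.List.index? substrings last).getD 0 : Nat) + 1
  | none => 0

-- candidate filter and extension map, as functions of the range index
def pvP (substrings : List (List Int)) (combo : List (List Int)) (i : Int) : Bool :=
  combo.all (fun sub => pvB_noOverlap (PySem.List.pyGetD substrings i []) sub)
def pvH (substrings : List (List Int)) (combo : List (List Int)) (i : Int) : List (List Int) :=
  combo ++ [PySem.List.pyGetD substrings i []]

-- "no duplicated self-compatible value", the termination half of Pre_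
def pvNDS (substrings : List (List Int)) : Prop :=
  ∀ c ∈ substrings, 2 ≤ substrings.count c → pvSelfCompat c = false

-- number of distinct substring values still compatible with every entry of combo
def pvUnb (substrings combo : List (List Int)) : Nat :=
  (substrings.dedup.filter (fun v => combo.all (fun sub => pvB_noOverlap v sub))).length

-- lexicographic measure (unblocked distinct values, remaining candidate range), Nat-encoded;
-- strictly decreases from a combo to each of its children under pvNDS
def pvMeas (substrings combo : List (List Int)) : Nat :=
  pvUnb substrings combo * (substrings.length + 1) +
    (substrings.length - (pvStart substrings combo).toNat)

-- the pre-order list of all proper descendants of a combo (fuel-indexed)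
def pvTree (substrings : List (List Int)) : Nat → List (List Int) → List (List (List Int))
  | 0, _ => []
  | f + 1, combo => (pvB_children substrings combo).flatMap (fun k => k :: pvTree substrings f k)

-- the sequence of combos the B loop appends from a given stack (fuel-indexed)
def pvSpine (substrings : List (List Int)) : Nat → List (List (List Int)) → List (List (List Int))
  | 0, _ => []
  | _ + 1, [] => []
  | f + 1, combo :: rest => combo :: pvSpine substrings f (pvB_children substrings combo ++ rest)

theorem pvSelfCompat_eq (c : List Int) : pvSelfCompat c = pvB_noOverlap c c := rfl

theorem pvA_noOverlapLoop_eq_all (candidate : List Int) (combo : List (List Int)) :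
    pvA_noOverlapLoop candidate combo = combo.all (fun sub => pvB_noOverlap candidate sub) := by
  induction combo with
  | nil => rfl
  | cons sub rest ih =>
    rw [List.all_cons, ← ih]
    simp only [pvA_noOverlapLoop, pvB_noOverlap]
    split
    · rename_i h; rw [h]; rfl
    · rename_i h; rw [Bool.not_eq_true] at h; rw [h]; rfl

theorem pvB_children_eq (substrings combo : List (List Int)) :
    pvB_children substrings combo =
      ((PySem.List.pyRange (pvStart substrings combo) (substrings.length : Int) 1).filter
        (pvP substrings combo)).map (pvH substrings combo) := by
  simp only [pvB_children, pvStart]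
  rw [PySem.List.foldl_append_if]
  rfl

theorem pv_foldl_if_map {α β γ : Type} (l : List α) (p : α → Bool) (h : α → β) (g : γ → β → γ) (init : γ) :
    l.foldl (fun acc i => if p i then g acc (h i) else acc) init = ((l.filter p).map h).foldl g init := by
  rw [List.foldl_map, ← PySem.List.foldl_if_eq_foldl_filter]

theorem pvA_aux_succ (substrings : List (List Int)) (f : Nat) (combo : List (List Int)) (combos : List (List (List Int))) :
    pvA_aux substrings (f + 1) combo combos =
      (pvB_children substrings combo).foldl (fun acc k => pvA_aux substrings f k (acc ++ [k])) combos := by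
  rw [pvB_children_eq, ← pv_foldl_if_map]
  simp only [pvA_aux, pvA_noOverlapLoop_eq_all, pvStart, pvP, pvH]

theorem pvA_aux_eq_tree (substrings : List (List Int)) (f : Nat) :
    ∀ (combo : List (List Int)) (combos : List (List (List Int))),
      pvA_aux substrings (f + 1) combo combos = combos ++ pvTree substrings (f + 1) combo := by
  induction f with
  | zero =>
    intro combo combos
    rw [pvA_aux_succ]
    have : (fun (acc : List (List (List Int))) (k : List (List Int)) => pvA_aux substrings 0 k (acc ++ [k])) =
        fun acc k => acc ++ [k] := by funext acc k; rfl
    rw [this, PySem.List.foldl_append_singleton_eq_self]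
    simp [pvTree]
  | succ f ih =>
    intro combo combos
    rw [pvA_aux_succ]
    have : (fun (acc : List (List (List Int))) (k : List (List Int)) => pvA_aux substrings (f + 1) k (acc ++ [k])) =
        fun acc k => acc ++ (k :: pvTree substrings (f + 1) k) := by
      funext acc k; rw [ih]; simp
    rw [this, PySem.List.foldl_append_eq_flatMap]
    rfl

theorem pvB_loop_eq_spine (substrings : List (List Int)) (f : Nat) :
    ∀ (combos stack : List (List (List Int))),
      pvB_loop substrings f combos stack = combos ++ pvSpine substrings f stack := by
  induction f with
  | zero => intro combos stack; simp [pvB_loop, pvSpine]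
  | succ f ih =>
    intro combos stack
    cases stack with
    | nil => simp [pvB_loop, pvSpine]
    | cons combo rest => simp [pvB_loop, pvSpine, ih]

theorem pvStart_nonneg (substrings combo : List (List Int)) : 0 ≤ pvStart substrings combo := by
  unfold pvStart
  cases combo.getLast? with
  | none => simp
  | some last => positivity

-- predicate-monotone filter length, with a strict version
theorem pv_filter_len_le {α : Type} (l : List α) (p q : α → Bool)
    (h : ∀ a ∈ l, p a = true → q a = true) :
    (l.filter p).length ≤ (l.filter q).length := by
  induction l with
  | nil => simp
  | cons b t ih =>
    have ht := ih (fun a ha => h a (List.mem_cons_of_mem _ ha))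
    simp only [List.filter_cons]
    by_cases hp : p b = true
    · rw [if_pos hp, if_pos (h b (List.mem_cons_self) hp)]
      simpa using ht
    · rw [if_neg hp]
      split <;> simp <;> omega

theorem pv_filter_len_lt {α : Type} (l : List α) (p q : α → Bool)
    (h : ∀ a ∈ l, p a = true → q a = true)
    (a : α) (ha : a ∈ l) (hq : q a = true) (hp : p a = false) :
    (l.filter p).length < (l.filter q).length := by
  induction l with
  | nil => simp at ha
  | cons b t ih =>
    have ht := pv_filter_len_le t p q (fun x hx => h x (List.mem_cons_of_mem _ hx))
    simp only [List.filter_cons]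
    rcases List.mem_cons.1 ha with rfl | hat
    · rw [if_neg (by simp [hp]), if_pos hq]
      simpa using Nat.lt_succ_of_le ht
    · have := ih (fun x hx => h x (List.mem_cons_of_mem _ hx)) hat
      by_cases hpb : p b = true
      · rw [if_pos hpb, if_pos (h b (List.mem_cons_self) hpb)]
        simpa using this
      · rw [if_neg hpb]
        split <;> simp <;> omega

-- two distinct positions holding the same value give count ≥ 2
theorem pv_count_two (l : List (List Int)) (c : List Int) (j i : Nat)
    (hj : j < i) (hi : i < l.length) (hcj : l[j]'(by omega) = c) (hci : l[i] = c) :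
    2 ≤ l.count c := by
  have hsplit : l = l.take i ++ l.drop i := (List.take_append_drop i l).symm
  have h1 : c ∈ l.take i := by
    have hjl : j < (l.take i).length := by simp; omega
    have hg : (l.take i)[j]'hjl = c := by rw [List.getElem_take]; exact hcj
    exact hg ▸ List.getElem_mem hjl
  have h2 : l.drop i = l[i] :: l.drop (i + 1) := List.drop_eq_getElem_cons hi
  calc 2 = 1 + 1 := rfl
    _ ≤ (l.take i).count c + (l.drop i).count c := by
        have := List.one_le_count_iff.2 h1
        have : 1 ≤ (l.drop i).count c := by
          rw [h2, hci, List.count_cons_self]; omega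
        omega
    _ = l.count c := by rw [← List.count_append, List.take_append_drop]
  
theorem pvMeas_lt (substrings : List (List Int)) (hnds : pvNDS substrings)
    {combo k : List (List Int)} (hk : k ∈ pvB_children substrings combo) :
    pvMeas substrings k < pvMeas substrings combo := by
  rw [pvB_children_eq] at hk
  obtain ⟨i, hi, rfl⟩ := List.mem_map.1 hk
  have hir := (List.mem_filter.1 hi).1
  have hP : pvP substrings combo i = true := (List.mem_filter.1 hi).2
  rw [PySem.List.mem_pyRange_one] at hir
  have h0 : 0 ≤ pvStart substrings combo := pvStart_nonneg substrings combo
  have hi0 : 0 ≤ i := le_trans h0 hir.1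
  have hlt : i.toNat < substrings.length := by omega
  have hcand : PySem.List.pyGetD substrings i [] = substrings[i.toNat] := by
    rw [PySem.List.pyGetD_of_nonneg _ _ hi0, List.getD_eq_getElem _ _ hlt]
  -- the first occurrence of the candidate value
  obtain ⟨j, hj⟩ : ∃ j, List.idxOf? (PySem.List.pyGetD substrings i []) substrings = some j := by
    cases hidx : List.idxOf? (PySem.List.pyGetD substrings i []) substrings with
    | none =>
      rw [List.idxOf?_eq_none_iff] at hidx
      exact absurd (hcand ▸ List.getElem_mem hlt) hidx
    | some j => exact ⟨j, rfl⟩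
  obtain ⟨hjlen, hjval, hjmin⟩ := List.idxOf?_eq_some_iff.1 hj
  have hji : j ≤ i.toNat := by
    by_contra hc
    exact hjmin i.toNat (by omega) hcand.symm
  have hstart : pvStart substrings (pvH substrings combo i) = (j : Int) + 1 := by
    unfold pvStart pvH
    rw [List.getLast?_concat]
    simp [PySem.List.index?_eq_idxOf?, hj]
  have hUle : pvUnb substrings (pvH substrings combo i) ≤ pvUnb substrings combo := by
    refine pv_filter_len_le _ _ _ (fun v _ hv => ?_)
    unfold pvH at hv
    rw [List.all_append] at hv
    exact (Bool.and_eq_true_iff.1 hv).1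
  have hSk : (pvStart substrings (pvH substrings combo i)).toNat = j + 1 := by
    rw [hstart]; omega
  have hSc : (pvStart substrings combo).toNat ≤ i.toNat := by omega
  by_cases hcase : j = i.toNat
  · -- fresh value: the remaining range strictly shrinks
    have hmul := Nat.mul_le_mul_right (substrings.length + 1) hUle
    unfold pvMeas
    rw [hSk]
    omega
  · -- duplicate value: it blocks itself, the unblocked count strictly shrinks
    have hcount : 2 ≤ substrings.count (PySem.List.pyGetD substrings i []) := by
      refine pv_count_two substrings _ j i.toNat (by omega) hlt hjval hcand.symm
    have hself : pvB_noOverlap (PySem.List.pyGetD substrings i [])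
        (PySem.List.pyGetD substrings i []) = false := by
      rw [← pvSelfCompat_eq]
      exact hnds _ (hcand ▸ List.getElem_mem hlt) hcount
    have hUlt : pvUnb substrings (pvH substrings combo i) < pvUnb substrings combo := by
      refine pv_filter_len_lt _ _ _ (fun v _ hv => by
          unfold pvH at hv; rw [List.all_append] at hv; exact (Bool.and_eq_true_iff.1 hv).1)
        (PySem.List.pyGetD substrings i []) (List.mem_dedup.2 (hcand ▸ List.getElem_mem hlt))
        (by unfold pvP at hP; exact hP) ?_
      unfold pvH
      rw [List.all_append]
      simp [hself]
    have hmul := Nat.mul_le_mul_right (substrings.length + 1) (Nat.succ_le_of_lt hUlt)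
    rw [Nat.succ_mul] at hmul
    unfold pvMeas
    rw [hSk]
    omega

theorem pvB_children_eq_nil (substrings combo : List (List Int)) (hnds : pvNDS substrings)
    (h : pvMeas substrings combo = 0) : pvB_children substrings combo = [] := by
  cases hc : pvB_children substrings combo with
  | nil => rfl
  | cons k rest =>
    have := pvMeas_lt substrings hnds (combo := combo) (k := k) (by rw [hc]; exact List.mem_cons_self)
    omega

theorem pvTree_succ (substrings : List (List Int)) (f : Nat) (combo : List (List Int)) :
    pvTree substrings (f + 1) combo =
      (pvB_children substrings combo).flatMap (fun k => k :: pvTree substrings f k) := rfl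

theorem pvTree_stable (substrings : List (List Int)) (hnds : pvNDS substrings) :
    ∀ (n : Nat) (combo : List (List Int)) (f g : Nat),
      pvMeas substrings combo ≤ n → pvMeas substrings combo ≤ f → pvMeas substrings combo ≤ g →
      pvTree substrings (f + 1) combo = pvTree substrings (g + 1) combo := by
  intro n
  induction n with
  | zero =>
    intro combo f g hn _ _
    simp [pvTree, pvB_children_eq_nil substrings combo hnds (Nat.le_zero.mp hn)]
  | succ n ih =>
    intro combo f g hn hf hg
    by_cases hz : pvMeas substrings combo = 0
    · simp [pvTree, pvB_children_eq_nil substrings combo hnds hz]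
    · obtain ⟨f', rfl⟩ : ∃ f', f = f' + 1 := ⟨f - 1, by omega⟩
      obtain ⟨g', rfl⟩ : ∃ g', g = g' + 1 := ⟨g - 1, by omega⟩
      rw [pvTree_succ, pvTree_succ]
      refine List.flatMap_congr (fun k hk => ?_)
      have hklt := pvMeas_lt substrings hnds hk
      rw [ih k f' g' (by omega) (by omega) (by omega)]

theorem pvTree_unfold (substrings : List (List Int)) (hnds : pvNDS substrings)
    (combo : List (List Int)) :
    pvTree substrings (pvMeas substrings combo + 1) combo =
      (pvB_children substrings combo).flatMap
        (fun k => k :: pvTree substrings (pvMeas substrings k + 1) k) := by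
  by_cases hz : pvMeas substrings combo = 0
  · rw [hz]; simp [pvTree, pvB_children_eq_nil substrings combo hnds hz]
  · obtain ⟨m', hm⟩ : ∃ m', pvMeas substrings combo = m' + 1 :=
      ⟨pvMeas substrings combo - 1, by omega⟩
    rw [hm, pvTree_succ]
    refine List.flatMap_congr (fun k hk => ?_)
    have hklt := pvMeas_lt substrings hnds hk
    rw [pvTree_stable substrings hnds m' k m' (pvMeas substrings k) (by omega) (by omega) (by omega)]

theorem pvSpine_eq_flat (substrings : List (List Int)) (hnds : pvNDS substrings) :
    ∀ (f : Nat) (stack : List (List (List Int))),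
      (stack.flatMap (fun C => C :: pvTree substrings (pvMeas substrings C + 1) C)).length ≤ f →
      pvSpine substrings f stack =
        stack.flatMap (fun C => C :: pvTree substrings (pvMeas substrings C + 1) C) := by
  intro f
  induction f with
  | zero =>
    intro stack h
    cases stack with
    | nil => rfl
    | cons C rest => simp at h
  | succ f ih =>
    intro stack h
    cases stack with
    | nil => rfl
    | cons C rest =>
      simp only [pvSpine]
      rw [ih (pvB_children substrings C ++ rest) ?_]
      · rw [List.flatMap_append, ← pvTree_unfold substrings hnds C]
        simp
      · rw [List.flatMap_append, ← pvTree_unfold substrings hnds C]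
        simp only [List.flatMap_cons, List.length_append, List.length_cons] at h ⊢
        omega

theorem pvTree_length_lt (substrings : List (List Int)) (hnds : pvNDS substrings) :
    ∀ (n : Nat) (combo : List (List Int)), pvMeas substrings combo ≤ n →
      (pvTree substrings (pvMeas substrings combo + 1) combo).length <
        (substrings.length + 1) ^ (pvMeas substrings combo + 1) := by
  intro n
  induction n with
  | zero =>
    intro combo hn
    have hz := Nat.le_zero.mp hn
    rw [hz]
    simp [pvTree, pvB_children_eq_nil substrings combo hnds hz]
  | succ n ih =>
    intro combo hn
    rw [pvTree_unfold substrings hnds combo, List.length_flatMap]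
    have hb : ∀ x ∈ (pvB_children substrings combo).map
        (fun k => (k :: pvTree substrings (pvMeas substrings k + 1) k).length),
        x ≤ (substrings.length + 1) ^ (pvMeas substrings combo) := by
      intro x hx
      obtain ⟨k, hk, rfl⟩ := List.mem_map.1 hx
      have hklt := pvMeas_lt substrings hnds hk
      have h1 := ih k (by omega)
      calc (k :: pvTree substrings (pvMeas substrings k + 1) k).length
          = (pvTree substrings (pvMeas substrings k + 1) k).length + 1 := by simp
        _ ≤ (substrings.length + 1) ^ (pvMeas substrings k + 1) := by omega
        _ ≤ (substrings.length + 1) ^ (pvMeas substrings combo) :=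
            Nat.pow_le_pow_right (by omega) (by omega)
    have hsum := List.sum_le_card_nsmul _ _ hb
    have hkids : (pvB_children substrings combo).length ≤ substrings.length := by
      rw [pvB_children_eq, List.length_map]
      calc (List.filter (pvP substrings combo)
            (PySem.List.pyRange (pvStart substrings combo) (substrings.length : Int))).length
          ≤ (PySem.List.pyRange (pvStart substrings combo) (substrings.length : Int)).length :=
            List.length_filter_le _ _
        _ ≤ substrings.length := by
            have := pvStart_nonneg substrings combo
            rw [PySem.List.length_pyRange_one]; omega
    have hpos : 1 ≤ (substrings.length + 1) ^ (pvMeas substrings combo) :=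
      Nat.one_le_pow _ _ (by omega)
    rw [List.length_map, smul_eq_mul] at hsum
    calc ((pvB_children substrings combo).map
          (fun k => (k :: pvTree substrings (pvMeas substrings k + 1) k).length)).sum
        ≤ (pvB_children substrings combo).length * (substrings.length + 1) ^ (pvMeas substrings combo) := hsum
      _ ≤ substrings.length * (substrings.length + 1) ^ (pvMeas substrings combo) :=
          Nat.mul_le_mul_right _ hkids
      _ < (substrings.length + 1) ^ (pvMeas substrings combo + 1) := by
          rw [pow_succ]; nlinarith

theorem pvMeas_le (substrings combo : List (List Int)) :
    pvMeas substrings combo ≤ substrings.length * (substrings.length + 1) + substrings.length := by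
  have h1 : pvUnb substrings combo ≤ substrings.length :=
    le_trans (List.length_filter_le _ _) (List.Sublist.length_le (List.dedup_sublist _))
  have h2 := Nat.mul_le_mul_right (substrings.length + 1) h1
  unfold pvMeas
  omega

theorem pvB_loop_nil (substrings : List (List Int)) (f : Nat) (combos : List (List (List Int))) :
    pvB_loop substrings f combos [] = combos := by cases f <;> rfl

theorem pv_main (combo_in_progress : List (List Int)) (combos : List (List (List Int)))
    (substrings : List (List Int)) (hnds : pvNDS substrings) :
    add_non_overlapping_substrings combo_in_progress combos substrings =
      add_non_overlapping_substrings_alt combo_in_progress combos substrings := by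
  unfold add_non_overlapping_substrings add_non_overlapping_substrings_alt
  rw [pvA_aux_eq_tree, pvB_loop_eq_spine]
  congr 1
  have hm := pvMeas_le substrings combo_in_progress
  have hflat : (pvB_children substrings combo_in_progress).flatMap
      (fun k => k :: pvTree substrings (pvMeas substrings k + 1) k) =
      pvTree substrings (pvMeas substrings combo_in_progress + 1) combo_in_progress :=
    (pvTree_unfold substrings hnds combo_in_progress).symm
  have hlen : ((pvB_children substrings combo_in_progress).flatMap
      (fun k => k :: pvTree substrings (pvMeas substrings k + 1) k)).length ≤
      (substrings.length + 1) ^ (substrings.length * (substrings.length + 1) + substrings.length + 1) := by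
    rw [hflat]
    have h1 := pvTree_length_lt substrings hnds (pvMeas substrings combo_in_progress)
      combo_in_progress le_rfl
    have h2 : (substrings.length + 1) ^ (pvMeas substrings combo_in_progress + 1) ≤
        (substrings.length + 1) ^ (substrings.length * (substrings.length + 1) + substrings.length + 1) :=
      Nat.pow_le_pow_right (by omega) (by omega)
    omega
  rw [pvSpine_eq_flat substrings hnds _ _ hlen, hflat]
  exact pvTree_stable substrings hnds (substrings.length * (substrings.length + 1) + substrings.length)
    combo_in_progress (substrings.length * (substrings.length + 1) + substrings.length)
    (pvMeas substrings combo_in_progress) hm hm le_rfl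

-- length ≤ 1 forbids duplicates outright
theorem pvNDS_of_short (substrings : List (List Int)) (h : substrings.length ≤ 1) :
    pvNDS substrings := by
  intro c hc h2
  have := List.count_le_length (a := c) (l := substrings)
  omega

-- when the combo's last entry is indexed last in substrings, both versions scan an empty range
theorem pv_trivial_A (combo_in_progress : List (List Int)) (combos : List (List (List Int)))
    (substrings : List (List Int)) (l : List Int) (hmem : l ∈ substrings)
    (hl : combo_in_progress.getLast? = some l)
    (hi : PySem.List.index? substrings l = some (substrings.length - 1)) :
    add_non_overlapping_substrings combo_in_progress combos substrings = combos := by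
  have h1 : 1 ≤ substrings.length := List.length_pos_of_mem hmem
  unfold add_non_overlapping_substrings
  obtain ⟨f, hf⟩ : ∃ f, substrings.length * (substrings.length + 1) + substrings.length + 1 = f + 1 :=
    ⟨_, rfl⟩
  rw [hf]
  simp only [pvA_aux, hl, hi, Option.getD_some]
  rw [PySem.List.pyRange_one_eq_nil (by omega)]
  rfl

theorem pv_trivial_B (combo_in_progress : List (List Int)) (combos : List (List (List Int)))
    (substrings : List (List Int)) (l : List Int) (hmem : l ∈ substrings)
    (hl : combo_in_progress.getLast? = some l)
    (hi : PySem.List.index? substrings l = some (substrings.length - 1)) :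
    add_non_overlapping_substrings_alt combo_in_progress combos substrings = combos := by
  have h1 : 1 ≤ substrings.length := List.length_pos_of_mem hmem
  unfold add_non_overlapping_substrings_alt
  rw [pvB_children_eq]
  have hi' : List.idxOf? l substrings = some (substrings.length - 1) := by
    rw [← PySem.List.index?_eq_idxOf?]; exact hi
  have hst : pvStart substrings combo_in_progress = ((substrings.length - 1 : Nat) : Int) + 1 := by
    simp [pvStart, hl, hi']
  rw [hst, PySem.List.pyRange_one_eq_nil (by omega)]
  exact pvB_loop_nil _ _ _

-- ===== VERDICT (by name: the statement is the Claim_ definition above) =====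
theorem add_non_overlapping_substrings_spec : Claim_equal_add_non_overlapping_substrings := by
  intro combo_in_progress combos substrings _hdom hpre
  unfold Spec_add_non_overlapping_substrings
  rcases hpre with ⟨hC, hcase⟩ | ⟨hC, l, hmem, hl, hcase⟩
  · rcases hcase with hlen | ⟨-, hnds⟩
    · exact pv_main _ _ _ (pvNDS_of_short substrings hlen)
    · exact pv_main _ _ _ hnds
  · rcases hcase with hi | ⟨-, -, hnds⟩
    · rw [pv_trivial_A _ _ _ l hmem hl hi, pv_trivial_B _ _ _ l hmem hl hi]
    · exact pv_main _ _ _ hnds
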